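-- pv_equiv track=rewrite | github.com/pypi-data/pypi-mirror-380 | packages/totalhelp/totalhelp-0.1.0.tar.gz/totalhelp-0.1.0/totalhelp/parser.py | _mode_indent
-- ===== SOURCE A (Python) =====
-- def _mode_indent(items: list[tuple[int, str]]) -> int | None:
--     """
--     Given def-list shaped items [(indent, token)], return the most common indent.
--     This is the baseline indent for commands in that section.
--     """
--     if not items:
--         return None
--     counts: dict[int, int] = {}
--     for ind, _ in items:
--         counts[ind] = counts.get(ind, 0) + 1
--     # choose smallest indent among the highest counts (favors the leftmost column)
--     max_count = max(counts.values())
--     candidates = [ind for ind, c in counts.items() if c == max_count]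
--     return min(candidates)
-- ===== SOURCE B (Python) =====
-- def _mode_indent(items: list[tuple[int, str]]) -> int | None:
--     """Most common indent, smallest on tie: sort the indents and scan
--     consecutive runs, keeping the first (smallest) run of maximal length."""
--     if not items:
--         return None
--     inds = sorted(ind for ind, _ in items)
--     best, best_len = None, 0
--     cur, cur_len = None, 0
--     for x in inds:
--         if x == cur:
--             cur_len += 1
--         else:
--             if cur_len > best_len:
--                 best, best_len = cur, cur_len
--             cur, cur_len = x, 1
--     return cur if cur_len > best_len else best
-- ===== Notes on version B (the rewrite author's own statement) =====
-- stated objective: alternative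
-- what changed: Replaces the counts dict + max + filter + min pipeline by sorting the indents and a single run-length scan of the sorted list (strict '>' keeps the first, i.e. smallest, maximal run).
import Mathlib
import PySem

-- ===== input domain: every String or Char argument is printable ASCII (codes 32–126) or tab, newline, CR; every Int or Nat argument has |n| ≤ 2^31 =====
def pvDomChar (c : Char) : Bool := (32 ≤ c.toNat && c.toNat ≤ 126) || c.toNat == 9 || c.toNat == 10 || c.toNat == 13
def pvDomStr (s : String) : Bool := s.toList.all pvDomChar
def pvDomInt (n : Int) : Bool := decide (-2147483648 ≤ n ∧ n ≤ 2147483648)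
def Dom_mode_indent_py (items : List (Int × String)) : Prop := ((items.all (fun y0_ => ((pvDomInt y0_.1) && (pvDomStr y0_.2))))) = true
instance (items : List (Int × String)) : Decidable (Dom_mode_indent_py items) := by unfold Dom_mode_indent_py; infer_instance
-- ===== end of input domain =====

-- B replaces A's counts-dict + max + filter + min pipeline by sorting the indents and
-- scanning consecutive runs once, keeping the first (smallest) maximal run.

-- ===== PORT A =====
def mode_indent_py (items : List (Int × String)) : Option Int :=
  if items = [] then none
  else
    let counts : PySem.Dict Int Int :=
      items.foldl (fun d p => d.insert p.1 (d.getD p.1 0 + 1)) PySem.Dict.empty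
    match PySem.List.max? counts.values (fun v => v) with
    | none => none
    | some maxCount =>
      let candidates := (counts.items.filter (fun p => p.2 == maxCount)).map (·.1)
      match PySem.List.min? candidates (fun v => v) with
      | none => none
      | some m => some m

-- ===== PORT B =====
-- the loop state (best, best_len, cur, cur_len); None → Option Int
def mode_indent_py_alt (items : List (Int × String)) : Option Int :=
  if items = [] then none
  else
    let inds := PySem.List.sorted (items.map (fun p => p.1)) (fun x => x) false
    let st := inds.foldl
      (fun (s : Option Int × Int × Option Int × Int) x =>
        let (best, bestLen, cur, curLen) := s
        if some x = cur then (best, bestLen, cur, curLen + 1)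
        else if curLen > bestLen then (cur, curLen, some x, 1)
        else (best, bestLen, some x, 1))
      (none, 0, none, 0)
    if st.2.2.2 > st.2.1 then st.2.2.1 else st.1

-- ===== PRECONDITION & SPEC =====
def Spec_mode_indent_py (items : List (Int × String)) (out : Option Int) : Prop := out = mode_indent_py_alt items
instance (items : List (Int × String)) (out : Option Int) : Decidable (Spec_mode_indent_py items out) := by unfold Spec_mode_indent_py; infer_instance

-- ===== CLAIM (what is proved, stated in full; the proofs are below) =====
def Claim_equal_mode_indent_py : Prop := ∀ (items : List (Int × String)), Dom_mode_indent_py items → Spec_mode_indent_py items (mode_indent_py items)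

-- ===== LEMMAS AND PROOFS =====

-- the answer characterization: m is the smallest indent of maximal multiplicity in xs
def IsAns (xs : List Int) (m : Int) : Prop :=
  m ∈ xs ∧ (∀ y ∈ xs, xs.count y ≤ xs.count m) ∧ (∀ y ∈ xs, xs.count y = xs.count m → m ≤ y)

theorem IsAns_unique {xs : List Int} {m m' : Int} (h : IsAns xs m) (h' : IsAns xs m') : m = m' := by
  obtain ⟨hm, hmax, hmin⟩ := h
  obtain ⟨hm', hmax', hmin'⟩ := h'
  have h1 : xs.count m = xs.count m' := le_antisymm (hmax' m hm) (hmax m' hm')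
  exact le_antisymm (hmin m' hm' h1.symm) (hmin' m hm h1)

theorem mode_indent_py_isAns (items : List (Int × String)) (h : items ≠ []) :
    ∃ m, mode_indent_py items = some m ∧ IsAns (items.map (fun p => p.1)) m := by
  set inds := items.map (fun p => p.1) with hinds
  have hcounts : items.foldl (fun d p => d.insert p.1 (d.getD p.1 0 + 1)) PySem.Dict.empty
      = PySem.Dict.counter inds := by
    rw [← PySem.Dict.foldl_insert_getD_add_one_eq_counter, hinds, List.foldl_map]
  have hindsne : inds ≠ [] := by simpa [hinds] using h
  unfold mode_indent_py
  rw [if_neg h, hcounts]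
  have hvals : (PySem.Dict.counter inds).values
      = (PySem.Set.ofList inds).map (fun k => ((inds.count k : Int))) := by
    show ((PySem.Dict.counter inds).items).map (fun p => p.2) = _
    rw [PySem.Dict.items_counter, List.map_map]
    rfl
  -- the set of distinct indents is nonempty
  obtain ⟨x0, hx0⟩ := List.exists_mem_of_ne_nil inds hindsne
  have hx0' : x0 ∈ PySem.Set.ofList inds := (PySem.Set.mem_ofList inds x0).mpr hx0
  have hvne : (PySem.Dict.counter inds).values ≠ [] := by
    rw [hvals]
    intro hc
    rw [List.map_eq_nil_iff] at hc
    simp [hc] at hx0'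
  obtain ⟨mc, hmc⟩ : ∃ mc, PySem.List.max? (PySem.Dict.counter inds).values (fun v => v) = some mc := by
    cases hm : PySem.List.max? (PySem.Dict.counter inds).values (fun v => v) with
    | none => exact absurd ((PySem.List.max?_eq_none_iff _ _).mp hm) hvne
    | some v => exact ⟨v, rfl⟩
  simp only [hmc]
  -- mc is attained and is the max of all counts
  have hmcmem := PySem.List.max?_mem hmc
  have hmcmax := PySem.List.max?_isMax hmc
  rw [hvals] at hmcmem hmcmax
  obtain ⟨k0, hk0mem, hk0⟩ := List.mem_map.mp hmcmem
  have hcand : ((PySem.Dict.counter inds).items.filter (fun p => p.2 == mc)).map (·.1)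
      = (PySem.Set.ofList inds).filter (fun k => ((inds.count k : Int)) == mc) := by
    rw [PySem.Dict.items_counter, List.filter_map, List.map_map]
    have : ((fun p : Int × Int => p.2 == mc) ∘ (fun k => (k, (inds.count k : Int))))
        = (fun k => ((inds.count k : Int)) == mc) := rfl
    rw [this]
    have h2 : ((fun x : Int × Int => x.1) ∘ fun k : Int => (k, (inds.count k : Int))) = id := rfl
    rw [h2, List.map_id]
  simp only [hcand]
  have hcandne : (PySem.Set.ofList inds).filter (fun k => ((inds.count k : Int)) == mc) ≠ [] := by
    intro hc
    have : k0 ∈ (PySem.Set.ofList inds).filter (fun k => ((inds.count k : Int)) == mc) :=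
      List.mem_filter.mpr ⟨hk0mem, by simp [hk0]⟩
    simp [hc] at this
  obtain ⟨m, hm⟩ : ∃ m, PySem.List.min? ((PySem.Set.ofList inds).filter (fun k => ((inds.count k : Int)) == mc)) (fun v => v) = some m := by
    cases hm : PySem.List.min? ((PySem.Set.ofList inds).filter (fun k => ((inds.count k : Int)) == mc)) (fun v => v) with
    | none => exact absurd ((PySem.List.min?_eq_none_iff _ _).mp hm) hcandne
    | some v => exact ⟨v, rfl⟩
  simp only [hm]
  refine ⟨m, rfl, ?_, ?_, ?_⟩
  · have := List.mem_filter.mp (PySem.List.min?_mem hm)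
    exact (PySem.Set.mem_ofList inds m).mp this.1
  · intro y hy
    have hyv : ((inds.count y : Int)) ≤ mc := by
      refine hmcmax _ (List.mem_map.mpr ⟨y, (PySem.Set.mem_ofList inds y).mpr hy, rfl⟩)
    have hmmc : ((inds.count m : Int)) = mc := by
      have := List.mem_filter.mp (PySem.List.min?_mem hm)
      simpa using this.2
    omega
  · intro y hy hcy
    have hmmc : ((inds.count m : Int)) = mc := by
      have := List.mem_filter.mp (PySem.List.min?_mem hm)
      simpa using this.2
    have hymem : y ∈ (PySem.Set.ofList inds).filter (fun k => ((inds.count k : Int)) == mc) := by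
      refine List.mem_filter.mpr ⟨(PySem.Set.mem_ofList inds y).mpr hy, ?_⟩
      simp only [beq_iff_eq]
      omega
    exact PySem.List.min?_isMin hm y hymem

-- B-side proof helpers: the loop body and its run-scan recursion
def bStep : (Option Int × Int × Option Int × Int) → Int → (Option Int × Int × Option Int × Int) :=
  fun s x =>
    let (best, bestLen, cur, curLen) := s
    if some x = cur then (best, bestLen, cur, curLen + 1)
    else if curLen > bestLen then (cur, curLen, some x, 1)
    else (best, bestLen, some x, 1)

def bScan (b : Option Int) (bl : Int) (c : Int) (k : Int) : List Int → Option Int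
  | [] => if k > bl then some c else b
  | x :: t => if x = c then bScan b bl c (k + 1) t
      else if k > bl then bScan (some c) k x 1 t
      else bScan b bl x 1 t

theorem fold_eq_bScan (t : List Int) : ∀ (b : Option Int) (bl c k : Int),
    (let st := t.foldl bStep (b, bl, some c, k);
     if st.2.2.2 > st.2.1 then st.2.2.1 else st.1) = bScan b bl c k t := by
  induction t with
  | nil => intro b bl c k; rfl
  | cons x t ih =>
    intro b bl c k
    simp only [List.foldl_cons, bScan]
    by_cases hx : x = c
    · subst hx
      simpa [bStep] using ih b bl x (k + 1)
    · by_cases hk : k > bl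
      · simpa [bStep, hx, hk] using ih (some c) k x 1
      · simpa [bStep, hx, hk] using ih b bl x 1

theorem bScan_good (t : List Int) : ∀ (c k bl : Int) (b : Option Int),
    List.Pairwise (· ≤ ·) t → (∀ y ∈ t, c ≤ y) → 1 ≤ k →
    ((b = none ∧ bl = 0) ∨ (∃ bv, b = some bv ∧ bv < c ∧ 1 ≤ bl)) →
    ( (bScan b bl c k t = b ∧ ∀ y : Int, (y = c ∨ y ∈ t) →
          (if y = c then k else 0) + (t.count y : Int) ≤ bl)
    ∨ (∃ m, bScan b bl c k t = some m ∧ (m = c ∨ m ∈ t)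
        ∧ bl < (if m = c then k else 0) + (t.count m : Int)
        ∧ (∀ y : Int, (y = c ∨ y ∈ t) →
            (if y = c then k else 0) + (t.count y : Int) ≤ (if m = c then k else 0) + (t.count m : Int))
        ∧ (∀ y : Int, (y = c ∨ y ∈ t) →
            (if y = c then k else 0) + (t.count y : Int) = (if m = c then k else 0) + (t.count m : Int) → m ≤ y)) ) := by
  induction t with
  | nil =>
    intro c k bl b _ _ hk hb
    simp only [bScan]
    by_cases hkb : k > bl
    · right
      refine ⟨c, by rw [if_pos hkb], Or.inl rfl, by simp; omega, ?_, ?_⟩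
      · intro y hy; rcases hy with rfl | hy2
        · exact le_rfl
        · simp at hy2
      · intro y hy _; rcases hy with rfl | hy2
        · exact le_rfl
        · simp at hy2
    · left
      refine ⟨by rw [if_neg hkb], ?_⟩
      intro y hy; rcases hy with rfl | hy2
      · simp; omega
      · simp at hy2
  | cons x t ih =>
    intro c k bl b hp hcle hk hb
    have hxle : ∀ y ∈ t, x ≤ y := (List.pairwise_cons.mp hp).1
    have hp' : List.Pairwise (· ≤ ·) t := (List.pairwise_cons.mp hp).2
    have hcx : c ≤ x := hcle x (List.mem_cons_self)
    by_cases hxc : x = c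
    · subst hxc
      have ih' := ih x (k + 1) bl b hp' (fun y hy => hcle y (List.mem_cons_of_mem _ hy)) (by omega) hb
      have hcnt : ∀ y : Int, (if y = x then k else 0) + (((x :: t).count y : Int))
          = (if y = x then k + 1 else 0) + (t.count y : Int) := by
        intro y
        by_cases h : y = x
        · subst h
          simp [List.count_cons]
          try omega
        · simp [List.count_cons, h, Ne.symm h]
          try omega
      have hdomeq : ∀ y : Int, (y = x ∨ y ∈ x :: t) ↔ (y = x ∨ y ∈ t) := by
        intro y
        simp [List.mem_cons]
        try tauto
      simp only [bScan, ite_self, if_pos (Eq.refl x)]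
      rcases ih' with ⟨he, hall⟩ | ⟨m, he, hdom, hgt, hmax, hmin⟩
      · left
        exact ⟨he, fun y hy => by rw [hcnt y]; exact hall y ((hdomeq y).mp hy)⟩
      · right
        refine ⟨m, he, (hdomeq m).mpr hdom, by rw [hcnt m]; exact hgt, ?_, ?_⟩
        · intro y hy; rw [hcnt y, hcnt m]; exact hmax y ((hdomeq y).mp hy)
        · intro y hy heq
          exact hmin y ((hdomeq y).mp hy) (by rw [hcnt y, hcnt m] at heq; exact heq)
    · have hcx' : c < x := lt_of_le_of_ne hcx (fun h => hxc h.symm)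
      have hcnot : c ∉ x :: t := by
        intro hmem
        rcases List.mem_cons.mp hmem with h | h
        · exact hxc h.symm
        · exact absurd (hxle c h) (by omega)
      have hcount0 : (x :: t).count c = 0 := List.count_eq_zero.mpr hcnot
      have hdomne : ∀ y : Int, (y = x ∨ y ∈ t) → y ≠ c := by
        intro y hy
        rcases hy with rfl | hy2
        · exact hxc
        · have := hxle y hy2; omega
      have hcnt : ∀ y : Int, y ≠ c →
          (if y = c then k else 0) + (((x :: t).count y : Int))
          = (if y = x then 1 else 0) + (t.count y : Int) := by
        intro y hy
        by_cases h : y = x <;> simp [List.count_cons, hy, h] <;> omega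
      have hcntc : (if c = c then k else 0) + (((x :: t).count c : Int)) = k := by
        simp [hcount0]
      simp only [bScan, if_neg hxc]
      by_cases hkb : k > bl
      · rw [if_pos hkb]
        have ih' := ih x 1 k (some c) hp' hxle le_rfl (Or.inr ⟨c, rfl, hcx', by omega⟩)
        rcases ih' with ⟨he, hall⟩ | ⟨m, he, hdom, hgt, hmax, hmin⟩
        · right
          refine ⟨c, by rw [he], Or.inl rfl, by rw [hcntc]; omega, ?_, ?_⟩
          · intro y hy
            rcases hy with rfl | hy2
            · exact le_rfl
            · have hy' : y = x ∨ y ∈ t := by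
                rcases List.mem_cons.mp hy2 with h | h
                · exact Or.inl h
                · exact Or.inr h
              rw [hcnt y (hdomne y hy'), hcntc]
              exact hall y hy'
          · intro y hy _
            rcases hy with rfl | hy2
            · exact le_rfl
            · have hy' : y = x ∨ y ∈ t := by
                rcases List.mem_cons.mp hy2 with h | h
                · exact Or.inl h
                · exact Or.inr h
              have := hdomne y hy'
              rcases hy' with rfl | hy3
              · omega
              · have := hxle y hy3; omega
        · right
          have hmne : m ≠ c := hdomne m hdom
          refine ⟨m, by rw [he], ?_, ?_, ?_, ?_⟩
          · right
            rcases hdom with rfl | h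
            · exact List.mem_cons_self
            · exact List.mem_cons_of_mem _ h
          · rw [hcnt m hmne]; omega
          · intro y hy
            rcases hy with rfl | hy2
            · rw [hcntc, hcnt m hmne]; omega
            · have hy' : y = x ∨ y ∈ t := by
                rcases List.mem_cons.mp hy2 with h | h
                · exact Or.inl h
                · exact Or.inr h
              rw [hcnt y (hdomne y hy'), hcnt m hmne]
              exact hmax y hy'
          · intro y hy heq
            rcases hy with rfl | hy2
            · rw [hcntc, hcnt m hmne] at heq; omega
            · have hy' : y = x ∨ y ∈ t := by
                rcases List.mem_cons.mp hy2 with h | h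
                · exact Or.inl h
                · exact Or.inr h
              rw [hcnt y (hdomne y hy'), hcnt m hmne] at heq
              exact hmin y hy' heq
      · rw [if_neg hkb]
        have hb' : (b = none ∧ bl = 0) ∨ (∃ bv, b = some bv ∧ bv < x ∧ 1 ≤ bl) := by
          rcases hb with h | ⟨bv, h1, h2, h3⟩
          · exact Or.inl h
          · exact Or.inr ⟨bv, h1, by omega, h3⟩
        have ih' := ih x 1 bl b hp' hxle le_rfl hb'
        rcases ih' with ⟨he, hall⟩ | ⟨m, he, hdom, hgt, hmax, hmin⟩
        · left
          refine ⟨he, ?_⟩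
          intro y hy
          rcases hy with rfl | hy2
          · rw [hcntc]; omega
          · have hy' : y = x ∨ y ∈ t := by
              rcases List.mem_cons.mp hy2 with h | h
              · exact Or.inl h
              · exact Or.inr h
            rw [hcnt y (hdomne y hy')]
            exact hall y hy'
        · right
          have hmne : m ≠ c := hdomne m hdom
          refine ⟨m, by rw [he], ?_, ?_, ?_, ?_⟩
          · right
            rcases hdom with rfl | h
            · exact List.mem_cons_self
            · exact List.mem_cons_of_mem _ h
          · rw [hcnt m hmne]; omega
          · intro y hy
            rcases hy with rfl | hy2
            · rw [hcntc, hcnt m hmne]; omega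
            · have hy' : y = x ∨ y ∈ t := by
                rcases List.mem_cons.mp hy2 with h | h
                · exact Or.inl h
                · exact Or.inr h
              rw [hcnt y (hdomne y hy'), hcnt m hmne]
              exact hmax y hy'
          · intro y hy heq
            rcases hy with rfl | hy2
            · rw [hcntc, hcnt m hmne] at heq; omega
            · have hy' : y = x ∨ y ∈ t := by
                rcases List.mem_cons.mp hy2 with h | h
                · exact Or.inl h
                · exact Or.inr h
              rw [hcnt y (hdomne y hy'), hcnt m hmne] at heq
              exact hmin y hy' heq

theorem mode_indent_py_alt_isAns (items : List (Int × String)) (h : items ≠ []) :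
    ∃ m, mode_indent_py_alt items = some m ∧ IsAns (items.map (fun p => p.1)) m := by
  set inds := items.map (fun p => p.1) with hinds
  have hne : inds ≠ [] := by simpa [hinds] using h
  set s := PySem.List.sorted inds (fun x => x) false with hs
  have hsne : s ≠ [] := by
    rw [hs]; intro hc; exact hne ((PySem.List.sorted_eq_nil_iff _ _ _).mp hc)
  obtain ⟨x, t, hst⟩ : ∃ x t, s = x :: t := by
    cases hc : s with
    | nil => exact absurd hc hsne
    | cons a l => exact ⟨a, l, rfl⟩
  have hperm : s.Perm inds := PySem.List.sorted_perm inds (fun x => x) false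
  have hpair : List.Pairwise (· ≤ ·) s := by
    have := PySem.List.sorted_pairwise inds (fun x => x)
    simpa [hs] using this
  have key : mode_indent_py_alt items = bScan none 0 x 1 t := by
    unfold mode_indent_py_alt
    rw [if_neg h]
    show (let st := (PySem.List.sorted (items.map (fun p => p.1)) (fun x => x) false).foldl bStep (none, 0, none, 0);
          if st.2.2.2 > st.2.1 then st.2.2.1 else st.1) = _
    rw [← hinds, ← hs, hst, List.foldl_cons]
    have hb1 : bStep (none, 0, none, 0) x = (none, 0, some x, 1) := by simp [bStep]
    rw [hb1]
    exact fold_eq_bScan t none 0 x 1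
  rw [hst] at hpair hperm
  have hxle : ∀ y ∈ t, x ≤ y := (List.pairwise_cons.mp hpair).1
  have hp' : List.Pairwise (· ≤ ·) t := (List.pairwise_cons.mp hpair).2
  have hgood := bScan_good t x 1 0 none hp' hxle le_rfl (Or.inl ⟨rfl, rfl⟩)
  have hc : ∀ y : Int, (if y = x then (1:Int) else 0) + (t.count y : Int) = (((x :: t).count y : Int)) := by
    intro y
    by_cases hyx : y = x
    · subst hyx
      simp [List.count_cons]
      try omega
    · simp [List.count_cons, hyx, Ne.symm hyx]
  have hdom : ∀ y : Int, (y = x ∨ y ∈ t) ↔ y ∈ inds := by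
    intro y
    rw [← hperm.mem_iff, List.mem_cons]
  have hcnt : ∀ y : Int, (x :: t).count y = inds.count y := fun y => hperm.count_eq y
  rcases hgood with ⟨_, hall⟩ | ⟨m, he, hdm, _, hmax, hmin⟩
  · exfalso
    have := hall x (Or.inl rfl)
    simp at this
    omega
  · refine ⟨m, by rw [key, he], ?_, ?_, ?_⟩
    · exact (hdom m).mp hdm
    · intro y hy
      have := hmax y ((hdom y).mpr hy)
      rw [hc y, hc m, hcnt y, hcnt m] at this
      exact_mod_cast this
    · intro y hy heq
      refine hmin y ((hdom y).mpr hy) ?_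
      rw [hc y, hc m, hcnt y, hcnt m]
      exact_mod_cast heq

-- ===== VERDICT (by name: the statement is the Claim_ definition above) =====
theorem mode_indent_py_spec : Claim_equal_mode_indent_py := by
  intro items _
  unfold Spec_mode_indent_py
  by_cases h : items = []
  · subst h; rfl
  · obtain ⟨m, hA, hAns⟩ := mode_indent_py_isAns items h
    obtain ⟨m', hB, hAns'⟩ := mode_indent_py_alt_isAns items h
    rw [hA, hB, IsAns_unique hAns hAns']
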